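-- pv_equiv track=rewrite | github.com/mochang2/coding-test | BOJ/2449 전구.py | calculateMinCosts
-- ===== SOURCE A (Python) =====
-- def calculateMinCosts(bulbs, min_costs):
--     for length in range(2, len(min_costs)):
--         for start in range(0, len(min_costs) - length):
--             end = start + length
--
--             for intermediate in range(start + 1, start + length + 1):
--                 is_same_color = bulbs[start] == bulbs[intermediate] # 왼쪽 기준으로 색을 통일
--                 combination_cost = min_costs[start][intermediate - 1] + min_costs[intermediate][end]
--
--                 min_costs[start][end] = min(
--                     min_costs[start][end],
--                     combination_cost if is_same_color else combination_cost + 1 # 같은 색이면 그룹을 합치는데 비용이 0, 다른 색이면 비용이 1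
--                 )
--
--     return min_costs
-- ===== SOURCE B (Python) =====
-- def calculateMinCosts(bulbs, min_costs):
--     # Top-down memoized recursion over intervals instead of A's bottom-up
--     # length/start/intermediate triple loop; same cells of min_costs are
--     # updated in place with the same final values.
--     n = len(min_costs)
--     memo = {}
--
--     def solve(start, end):
--         if end - start < 2:
--             return min_costs[start][end]
--         if (start, end) in memo:
--             return memo[(start, end)]
--         best = min_costs[start][end]
--         for m in range(start + 1, end + 1):
--             cost = solve(start, m - 1) + solve(m, end)
--             if bulbs[start] != bulbs[m]:
--                 cost += 1
--             if cost < best: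
--                 best = cost
--         memo[(start, end)] = best
--         min_costs[start][end] = best
--         return best
--
--     if n >= 3:
--         solve(0, n - 1)
--     return min_costs
-- ===== Notes on version B (the rewrite author's own statement) =====
-- stated objective: alternative
-- what changed: Replaces A's bottom-up length/start/intermediate triple loop with a top-down memoized recursion solve(start, end) over intervals (a dict memo keyed by the interval), updating the same cells of min_costs in place with the same final values.
import Mathlib
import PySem

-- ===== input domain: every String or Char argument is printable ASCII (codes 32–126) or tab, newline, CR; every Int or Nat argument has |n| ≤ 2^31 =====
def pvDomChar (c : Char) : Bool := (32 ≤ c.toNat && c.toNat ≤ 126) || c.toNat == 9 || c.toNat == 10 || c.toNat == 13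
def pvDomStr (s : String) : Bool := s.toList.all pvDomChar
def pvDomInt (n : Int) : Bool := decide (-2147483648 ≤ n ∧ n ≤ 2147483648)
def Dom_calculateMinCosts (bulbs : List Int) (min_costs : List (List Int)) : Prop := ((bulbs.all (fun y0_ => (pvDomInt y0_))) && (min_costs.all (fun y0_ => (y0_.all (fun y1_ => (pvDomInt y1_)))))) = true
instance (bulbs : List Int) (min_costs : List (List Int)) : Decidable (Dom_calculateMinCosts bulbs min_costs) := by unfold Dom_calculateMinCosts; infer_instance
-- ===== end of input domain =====

-- B replaces A's bottom-up length/start/intermediate triple loop by a top-down memoized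
-- recursion over intervals (objective: alternative decomposition, same O(n^3) cost).
-- Both A and B mutate min_costs in place with the same final cell values; the theorems
-- here are about the returned value.

-- shared subscript helpers (Python xs[i] / m[s][e] / m[s][e] = v; IndexError excluded by Pre_)
def pvGetI (xs : List Int) (i : Int) : Int := PySem.List.pyGetD xs i 0
def pvRow (m : List (List Int)) (i : Int) : List Int := PySem.List.pyGetD m i []
def pvGet2 (m : List (List Int)) (s e : Int) : Int := pvGetI (pvRow m s) e
def pvSet2 (m : List (List Int)) (s e : Int) (v : Int) : List (List Int) :=
  PySem.List.pySetD m s (PySem.List.pySetD (pvRow m s) e v)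

-- ===== PORT A =====
-- len(min_costs) is constant throughout A's loops (cell assignment keeps all lengths).
def calculateMinCosts (bulbs : List Int) (min_costs : List (List Int)) : List (List Int) :=
  (PySem.List.pyRange 2 (min_costs.length : Int) 1).foldl (fun mc length =>
    (PySem.List.pyRange 0 ((min_costs.length : Int) - length) 1).foldl (fun mc start =>
      let e := start + length
      (PySem.List.pyRange (start + 1) (start + length + 1) 1).foldl (fun mc intermediate =>
        let is_same_color := pvGetI bulbs start == pvGetI bulbs intermediate
        let combination_cost := pvGet2 mc start (intermediate - 1) + pvGet2 mc intermediate e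
        pvSet2 mc start e (min (pvGet2 mc start e)
          (if is_same_color then combination_cost else combination_cost + 1))) mc) mc) min_costs

-- ===== PORT B =====
-- solve(start, end) of Source B; state = (memo, min_costs).  The fuel argument only makes the
-- recursion structural (it is always ≥ the interval span + 1, proved below); it changes no value.
def pvSolve (bulbs : List Int) (fuel : Nat) (s e : Int)
    (st : PySem.Dict (Int × Int) Int × List (List Int)) :
    Int × PySem.Dict (Int × Int) Int × List (List Int) :=
  match fuel with
  | 0 => (0, st)
  | fuel + 1 =>
    if e - s < 2 then (pvGet2 st.2 s e, st)
    else
      match st.1.get? (s, e) with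
      | some v => (v, st)
      | none =>
        let r := (PySem.List.pyRange (s + 1) (e + 1) 1).foldl
          (fun (p : Int × PySem.Dict (Int × Int) Int × List (List Int)) m =>
            let r1 := pvSolve bulbs fuel s (m - 1) p.2
            let r2 := pvSolve bulbs fuel m e r1.2
            let cost0 := r1.1 + r2.1
            let cost := if pvGetI bulbs s ≠ pvGetI bulbs m then cost0 + 1 else cost0
            (if cost < p.1 then cost else p.1, r2.2))
          (pvGet2 st.2 s e, st)
        (r.1, r.2.1.insert (s, e) r.1, pvSet2 r.2.2 s e r.1)

def calculateMinCosts_alt (bulbs : List Int) (min_costs : List (List Int)) : List (List Int) :=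
  if 3 ≤ min_costs.length then
    (pvSolve bulbs min_costs.length 0 ((min_costs.length : Int) - 1)
      (PySem.Dict.empty, min_costs)).2.2
  else min_costs

-- ===== PRECONDITION & SPEC =====
-- exactly where A returns: for n = len(min_costs) ≥ 3 it indexes bulbs[0..n-1] and every
-- row of min_costs at columns up to n-1; otherwise its loops are empty and it cannot raise.
def Pre_calculateMinCosts (bulbs : List Int) (min_costs : List (List Int)) : Prop :=
  3 ≤ min_costs.length →
    (min_costs.length ≤ bulbs.length ∧ ∀ row ∈ min_costs, min_costs.length ≤ row.length)
instance (bulbs : List Int) (min_costs : List (List Int)) : Decidable (Pre_calculateMinCosts bulbs min_costs) := by unfold Pre_calculateMinCosts; infer_instance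
def pvWitness_calculateMinCosts : List Int × List (List Int) :=
  ([0, 1, 0], [[0, 0, 0], [0, 0, 0], [0, 0, 0]])
def Spec_calculateMinCosts (bulbs : List Int) (min_costs : List (List Int)) (out : List (List Int)) : Prop := out = calculateMinCosts_alt bulbs min_costs
instance (bulbs : List Int) (min_costs : List (List Int)) (out : List (List Int)) : Decidable (Spec_calculateMinCosts bulbs min_costs out) := by unfold Spec_calculateMinCosts; infer_instance

-- ===== CLAIM (what is proved, stated in full; the proofs are below) =====
def Claim_equal_calculateMinCosts : Prop := ∀ (bulbs : List Int) (min_costs : List (List Int)), Dom_calculateMinCosts bulbs min_costs → Pre_calculateMinCosts bulbs min_costs → Spec_calculateMinCosts bulbs min_costs (calculateMinCosts bulbs min_costs)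

-- ===== LEMMAS AND PROOFS =====

-- bridges to Nat-indexed getD/set
theorem pvGetI_nonneg (xs : List Int) (i : Int) (h : 0 ≤ i) :
    pvGetI xs i = xs.getD i.toNat 0 := by
  obtain ⟨n, rfl⟩ : ∃ n : Nat, i = (n : Int) := ⟨i.toNat, by omega⟩
  simp [pvGetI]

theorem pvRow_nonneg (m : List (List Int)) (i : Int) (h : 0 ≤ i) :
    pvRow m i = m.getD i.toNat [] := by
  obtain ⟨n, rfl⟩ : ∃ n : Nat, i = (n : Int) := ⟨i.toNat, by omega⟩
  simp [pvRow]

theorem pvGet2_nn (m : List (List Int)) (s e : Int) (hs : 0 ≤ s) (he : 0 ≤ e) :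
    pvGet2 m s e = (m.getD s.toNat []).getD e.toNat 0 := by
  rw [pvGet2, pvRow_nonneg m s hs, pvGetI_nonneg _ e he]

theorem pvGet2_natCast (m : List (List Int)) (i j : Nat) :
    pvGet2 m (i : Int) (j : Int) = (m.getD i []).getD j 0 := by
  simp [pvGet2, pvRow, pvGetI]

theorem pvSet2_nn (m : List (List Int)) (s e : Int) (v : Int) (hs : 0 ≤ s) (he : 0 ≤ e) :
    pvSet2 m s e v = m.set s.toNat ((m.getD s.toNat []).set e.toNat v) := by
  obtain ⟨ns, rfl⟩ : ∃ n : Nat, s = (n : Int) := ⟨s.toNat, by omega⟩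
  obtain ⟨ne, rfl⟩ : ∃ n : Nat, e = (n : Int) := ⟨e.toNat, by omega⟩
  simp [pvSet2, pvRow]

theorem getD_set_row (m : List (List Int)) (n : Nat) (r : List Int) (i : Nat) :
    ((m.set n r).getD i []) = if i = n ∧ n < m.length then r else m.getD i [] := by
  by_cases h2 : n < m.length
  · by_cases h1 : i = n
    · subst h1
      simp [List.getD_eq_getElem?_getD, h2]
    · simp [List.getD_eq_getElem?_getD, List.getElem?_set_ne (by omega : n ≠ i), h1]
  · rw [List.set_eq_of_length_le (by omega)]; simp [h2]

theorem getD_set_elem (l : List Int) (n : Nat) (v : Int) (j : Nat) :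
    ((l.set n v).getD j 0) = if j = n ∧ n < l.length then v else l.getD j 0 := by
  by_cases h2 : n < l.length
  · by_cases h1 : j = n
    · subst h1
      simp [List.getD_eq_getElem?_getD, h2]
    · simp [List.getD_eq_getElem?_getD, List.getElem?_set_ne (by omega : n ≠ j), h1]
  · rw [List.set_eq_of_length_le (by omega)]; simp [h2]

theorem len_pvSet2 (m : List (List Int)) (s e : Int) (v : Int) :
    (pvSet2 m s e v).length = m.length := by
  simp [pvSet2, PySem.List.length_pySetD]

theorem rowlen_pvSet2 (m : List (List Int)) (s e : Int) (v : Int) (hs : 0 ≤ s) (he : 0 ≤ e)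
    (i : Nat) : ((pvSet2 m s e v).getD i []).length = (m.getD i []).length := by
  rw [pvSet2_nn m s e v hs he, getD_set_row]
  split
  · rename_i h; rw [List.length_set, h.1]
  · rfl

theorem pvGet2_pvSet2 (m : List (List Int)) (s e : Int) (v : Int) (i j : Int)
    (hs : 0 ≤ s) (he : 0 ≤ e) (hi : 0 ≤ i) (hj : 0 ≤ j)
    (hsl : s < m.length) (hel : e < (pvRow m s).length) :
    pvGet2 (pvSet2 m s e v) i j = if i = s ∧ j = e then v else pvGet2 m i j := by
  rw [pvRow_nonneg m s hs] at hel
  rw [pvSet2_nn m s e v hs he, pvGet2_nn _ i j hi hj, pvGet2_nn m i j hi hj, getD_set_row]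
  by_cases h1 : i = s
  · subst h1
    rw [if_pos ⟨by omega, by omega⟩, getD_set_elem]
    by_cases h2 : j = e
    · subst h2; rw [if_pos ⟨rfl, by omega⟩, if_pos ⟨rfl, rfl⟩]
    · rw [if_neg (by omega), if_neg (by simp [h2])]
  · rw [if_neg (by omega), if_neg (by simp [h1])]

theorem pvSet2_pvSet2 (m : List (List Int)) (s e : Int) (v w : Int)
    (hs : 0 ≤ s) (he : 0 ≤ e) (hsl : s < m.length) :
    pvSet2 (pvSet2 m s e v) s e w = pvSet2 m s e w := by
  rw [pvSet2_nn m s e v hs he, pvSet2_nn _ s e w hs he, pvSet2_nn m s e w hs he]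
  rw [getD_set_row, if_pos ⟨rfl, by omega⟩, List.set_set, List.set_set]

-- the common interval-DP value both programs compute: V(s,e) with fuel-driven recursion
def pvDelta (bulbs : List Int) (s m : Int) : Int :=
  if pvGetI bulbs s = pvGetI bulbs m then 0 else 1

def pvVF (bulbs : List Int) (init : List (List Int)) : Nat → Int → Int → Int
  | 0, _, _ => 0
  | f + 1, s, e =>
    if e - s < 2 then pvGet2 init s e
    else (PySem.List.pyRange (s + 1) (e + 1) 1).foldl
      (fun acc m => min acc (pvVF bulbs init f s (m - 1) + pvVF bulbs init f m e + pvDelta bulbs s m))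
      (pvGet2 init s e)

def pvV (bulbs : List Int) (init : List (List Int)) (s e : Int) : Int :=
  pvVF bulbs init ((e - s).toNat + 1) s e

theorem pvVF_irrel (bulbs : List Int) (init : List (List Int)) :
    ∀ f f' s e, (e - s).toNat < f → (e - s).toNat < f' →
      pvVF bulbs init f s e = pvVF bulbs init f' s e := by
  intro f
  induction f with
  | zero => intro f' s e h; omega
  | succ f ih =>
    intro f' s e h h'
    obtain ⟨f'', rfl⟩ : ∃ g, f' = g + 1 := ⟨f' - 1, by omega⟩
    simp only [pvVF]
    by_cases hb : e - s < 2
    · simp [hb]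
    · rw [if_neg hb, if_neg hb]
      apply PySem.List.foldl_congr_mem
      intro acc m hm
      rw [PySem.List.mem_pyRange_one] at hm
      rw [ih f'' s (m - 1) (by omega) (by omega), ih f'' m e (by omega) (by omega)]

theorem pvV_base (bulbs : List Int) (init : List (List Int)) (s e : Int) (h : e - s < 2) :
    pvV bulbs init s e = pvGet2 init s e := by
  simp [pvV, pvVF, h]

theorem pvV_step (bulbs : List Int) (init : List (List Int)) (s e : Int) (h : ¬ e - s < 2) :
    pvV bulbs init s e =
      (PySem.List.pyRange (s + 1) (e + 1) 1).foldl
        (fun acc m => min acc (pvV bulbs init s (m - 1) + pvV bulbs init m e + pvDelta bulbs s m))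
        (pvGet2 init s e) := by
  rw [pvV]
  simp only [pvVF]
  rw [if_neg h]
  apply PySem.List.foldl_congr_mem
  intro acc m hm
  rw [PySem.List.mem_pyRange_one] at hm
  rw [pvVF_irrel bulbs init ((e - s).toNat) (((m - 1) - s).toNat + 1) s (m - 1) (by omega) (by omega),
      pvVF_irrel bulbs init ((e - s).toNat) ((e - m).toNat + 1) m e (by omega) (by omega)]
  rfl

-- matrix-state description: lengths unchanged, every "done" cell holds V, the rest hold init
def MDesc (bulbs : List Int) (init mc : List (List Int)) (done : Int → Int → Bool) : Prop :=
  mc.length = init.length ∧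
  (∀ i : Nat, (mc.getD i []).length = (init.getD i []).length) ∧
  (∀ s e : Int, 0 ≤ s → 0 ≤ e →
    pvGet2 mc s e = if done s e then pvV bulbs init s e else pvGet2 init s e)

theorem MDesc_eq (bulbs : List Int) (init X Y : List (List Int)) (done : Int → Int → Bool)
    (hX : MDesc bulbs init X done) (hY : MDesc bulbs init Y done) : X = Y := by
  obtain ⟨hlX, hrX, hgX⟩ := hX
  obtain ⟨hlY, hrY, hgY⟩ := hY
  apply List.ext_getElem (by omega)
  intro i h1 h2
  apply List.ext_getElem (by rw [← List.getD_eq_getElem X [] h1, ← List.getD_eq_getElem Y [] h2, hrX, hrY])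
  intro j hj1 hj2
  have hv := (hgX (i : Int) (j : Int) (by positivity) (by positivity)).trans
    ((hgY (i : Int) (j : Int) (by positivity) (by positivity))).symm
  rw [pvGet2_natCast, pvGet2_natCast] at hv
  rwa [List.getD_eq_getElem X [] h1, List.getD_eq_getElem Y [] h2,
    List.getD_eq_getElem _ 0 hj1, List.getD_eq_getElem _ 0 hj2] at hv

theorem MDesc_congr (bulbs : List Int) (init mc : List (List Int)) (d d' : Int → Int → Bool)
    (h : ∀ s e : Int, 0 ≤ s → 0 ≤ e → d s e = d' s e) (hm : MDesc bulbs init mc d) :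
    MDesc bulbs init mc d' := by
  obtain ⟨h1, h2, h3⟩ := hm
  exact ⟨h1, h2, fun s e hs he => by rw [← h s e hs he]; exact h3 s e hs he⟩

-- generic invariant rule for a fold over range(a, b)
theorem foldl_pyRange_inv {α : Type} (f : α → Int → α) (P : Int → α → Prop) (b a : Int) (x : α)
    (hstep : ∀ i y, a ≤ i → i < b → P i y → P (i + 1) (f y i)) (hab : a ≤ b) (hP : P a x) :
    P b ((PySem.List.pyRange a b 1).foldl f x) := by
  by_cases h : a = b
  · subst h; rw [PySem.List.pyRange_one_eq_nil le_rfl]; simpa using hP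
  · have hlt : a < b := lt_of_le_of_ne hab h
    rw [PySem.List.pyRange_one_cons hlt, List.foldl_cons]
    exact foldl_pyRange_inv f P b (a + 1) (f x a)
      (fun i y h1 h2 => hstep i y (by omega) h2) (by omega) (hstep a x le_rfl hlt hP)
termination_by (b - a).toNat
decreasing_by omega


-- ===== A-side characterization =====
def pvDoneA (N L S s e : Int) : Bool :=
  decide (0 ≤ s ∧ 2 ≤ e - s ∧ e < N ∧ (e - s < L ∨ (e - s = L ∧ s < S)))

def pvDoneF (N s e : Int) : Bool := decide (0 ≤ s ∧ 2 ≤ e - s ∧ e < N)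

theorem rowlen_ge (init mc : List (List Int)) (hlen : mc.length = init.length)
    (hrl : ∀ i : Nat, (mc.getD i []).length = (init.getD i []).length)
    (hrows : ∀ row ∈ init, init.length ≤ row.length)
    (s : Int) (hs : 0 ≤ s) (hsN : s < (init.length : Int)) :
    (init.length : Int) ≤ ((pvRow mc s).length : Int) := by
  rw [pvRow_nonneg mc s hs, hrl]
  have hmem : init.getD s.toNat [] ∈ init := by
    rw [List.getD_eq_getElem init [] (by omega)]
    exact List.getElem_mem _
  exact_mod_cast hrows _ hmem

theorem pvSet2_self (m : List (List Int)) (s e : Int) (hs : 0 ≤ s) (he : 0 ≤ e)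
    (hsl : s < (m.length : Int)) (hel : e < ((pvRow m s).length : Int)) :
    pvSet2 m s e (pvGet2 m s e) = m := by
  rw [pvRow_nonneg m s hs] at hel
  rw [pvSet2_nn _ _ _ _ hs he, pvGet2_nn _ _ _ hs he]
  have hsl' : s.toNat < m.length := by omega
  have hel' : e.toNat < (m.getD s.toNat []).length := by omega
  rw [List.getD_eq_getElem m [] hsl'] at hel' ⊢
  rw [List.getD_eq_getElem _ 0 hel', List.set_getElem_self, List.set_getElem_self]

theorem MDesc_read_lt (bulbs : List Int) (init mc : List (List Int)) (N L S : Int)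
    (hM : MDesc bulbs init mc (pvDoneA N L S))
    (s e : Int) (hs : 0 ≤ s) (hse : s ≤ e) (he : e < N) (hspan : e - s < L) :
    pvGet2 mc s e = pvV bulbs init s e := by
  have h := hM.2.2 s e hs (by omega)
  by_cases h2 : 2 ≤ e - s
  · rwa [if_pos (by simp only [pvDoneA, decide_eq_true_eq]; omega)] at h
  · rw [if_neg (by simp only [pvDoneA, decide_eq_true_eq]; omega)] at h
    rw [h, pvV_base bulbs init s e (by omega)]

theorem lemA_inner (bulbs : List Int) (init : List (List Int)) (N L S : Int)
    (hN : N = (init.length : Int))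
    (hrows : ∀ row ∈ init, init.length ≤ row.length)
    (hL2 : 2 ≤ L) (hLN : L < N) (hS0 : 0 ≤ S) (hSN : S < N - L)
    (mc : List (List Int)) (hM : MDesc bulbs init mc (pvDoneA N L S)) :
    (PySem.List.pyRange (S + 1) (S + L + 1) 1).foldl
      (fun mc intermediate =>
        let is_same_color := pvGetI bulbs S == pvGetI bulbs intermediate
        let combination_cost := pvGet2 mc S (intermediate - 1) + pvGet2 mc intermediate (S + L)
        pvSet2 mc S (S + L) (min (pvGet2 mc S (S + L))
          (if is_same_color then combination_cost else combination_cost + 1))) mc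
      = pvSet2 mc S (S + L) (pvV bulbs init S (S + L)) := by
  have hlen : mc.length = init.length := hM.1
  have hrowge : ∀ s : Int, 0 ≤ s → s < N →
      (init.length : Int) ≤ ((pvRow mc s).length : Int) := fun s hs hsN =>
    rowlen_ge init mc hlen hM.2.1 hrows s hs (by omega)
  have hSlt : S < (mc.length : Int) := by omega
  have hElt : S + L < ((pvRow mc S).length : Int) := by
    have := hrowge S hS0 (by omega); omega
  have hcell : pvGet2 mc S (S + L) = pvGet2 init S (S + L) := by
    have h := hM.2.2 S (S + L) hS0 (by omega)
    rwa [if_neg (by simp only [pvDoneA, decide_eq_true_eq]; omega)] at h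
  have hP := foldl_pyRange_inv
    (fun mc intermediate =>
      let is_same_color := pvGetI bulbs S == pvGetI bulbs intermediate
      let combination_cost := pvGet2 mc S (intermediate - 1) + pvGet2 mc intermediate (S + L)
      pvSet2 mc S (S + L) (min (pvGet2 mc S (S + L))
        (if is_same_color then combination_cost else combination_cost + 1)))
    (fun i st => st = pvSet2 mc S (S + L)
      ((PySem.List.pyRange (S + 1) i 1).foldl
        (fun acc m => min acc (pvV bulbs init S (m - 1) + pvV bulbs init m (S + L) + pvDelta bulbs S m))
        (pvGet2 init S (S + L))))
    (S + L + 1) (S + 1) mc ?step (by omega) ?init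
  case init =>
    show mc = _
    rw [PySem.List.pyRange_one_eq_nil le_rfl, List.foldl_nil, ← hcell,
      pvSet2_self mc S (S + L) hS0 (by omega) hSlt hElt]
  case step =>
    intro i st hi1 hi2 hst
    dsimp only
    rw [hst]
    set acc := (PySem.List.pyRange (S + 1) i 1).foldl
      (fun acc m => min acc (pvV bulbs init S (m - 1) + pvV bulbs init m (S + L) + pvDelta bulbs S m))
      (pvGet2 init S (S + L)) with hacc
    have hr1 : pvGet2 (pvSet2 mc S (S + L) acc) S (i - 1) = pvV bulbs init S (i - 1) := by
      rw [pvGet2_pvSet2 mc S (S + L) acc S (i - 1) hS0 (by omega) hS0 (by omega) hSlt hElt,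
        if_neg (by omega)]
      exact MDesc_read_lt bulbs init mc N L S hM S (i - 1) hS0 (by omega) (by omega) (by omega)
    have hr2 : pvGet2 (pvSet2 mc S (S + L) acc) i (S + L) = pvV bulbs init i (S + L) := by
      rw [pvGet2_pvSet2 mc S (S + L) acc i (S + L) hS0 (by omega) (by omega) (by omega) hSlt hElt,
        if_neg (by omega)]
      exact MDesc_read_lt bulbs init mc N L S hM i (S + L) (by omega) (by omega) (by omega) (by omega)
    have hrc : pvGet2 (pvSet2 mc S (S + L) acc) S (S + L) = acc := by
      rw [pvGet2_pvSet2 mc S (S + L) acc S (S + L) hS0 (by omega) hS0 (by omega) hSlt hElt,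
        if_pos ⟨rfl, rfl⟩]
    rw [hr1, hr2, hrc, pvSet2_pvSet2 mc S (S + L) _ _ hS0 (by omega) hSlt,
      PySem.List.pyRange_one_succ_right (by omega : S + 1 ≤ i), List.foldl_append,
      List.foldl_cons, List.foldl_nil, ← hacc]
    congr 1
    by_cases hb : pvGetI bulbs S = pvGetI bulbs i
    · simp [pvDelta, hb]
    · simp [pvDelta, hb]
  rw [hP, ← pvV_step bulbs init S (S + L) (by omega)]

theorem lemA_set_done (bulbs : List Int) (init : List (List Int)) (N L S : Int)
    (hN : N = (init.length : Int))
    (hrows : ∀ row ∈ init, init.length ≤ row.length)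
    (hL2 : 2 ≤ L) (hLN : L < N) (hS0 : 0 ≤ S) (hSN : S < N - L)
    (mc : List (List Int)) (hM : MDesc bulbs init mc (pvDoneA N L S)) :
    MDesc bulbs init (pvSet2 mc S (S + L) (pvV bulbs init S (S + L))) (pvDoneA N L (S + 1)) := by
  have hlen : mc.length = init.length := hM.1
  have hrowge := fun s hs hsN => rowlen_ge init mc hlen hM.2.1 hrows s hs hsN
  have hSlt : S < (mc.length : Int) := by omega
  have hElt : S + L < ((pvRow mc S).length : Int) := by
    have := hrowge S hS0 (by omega); omega
  refine ⟨by rw [len_pvSet2, hlen], fun i => by rw [rowlen_pvSet2 _ _ _ _ hS0 (by omega), hM.2.1],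
    fun s e hs he => ?_⟩
  rw [pvGet2_pvSet2 mc S (S + L) _ s e hS0 (by omega) hs he hSlt hElt]
  by_cases hcell : s = S ∧ e = S + L
  · obtain ⟨rfl, rfl⟩ := hcell
    rw [if_pos ⟨rfl, rfl⟩, if_pos (by simp only [pvDoneA, decide_eq_true_eq]; omega)]
  · rw [if_neg hcell, hM.2.2 s e hs he]
    have hd : pvDoneA N L S s e = pvDoneA N L (S + 1) s e := by
      simp only [pvDoneA, decide_eq_decide]
      constructor <;> intro h <;> omega
    rw [hd]

theorem lemA_main (bulbs : List Int) (init : List (List Int))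
    (h3 : 3 ≤ init.length)
    (hrows : ∀ row ∈ init, init.length ≤ row.length) :
    MDesc bulbs init (calculateMinCosts bulbs init) (pvDoneF (init.length : Int)) := by
  unfold calculateMinCosts
  refine MDesc_congr bulbs init _ (pvDoneA (init.length : Int) (init.length : Int) 0) _
    (fun s e hs he => by
      simp only [pvDoneA, pvDoneF, decide_eq_decide]
      constructor <;> intro h <;> omega) ?_
  refine foldl_pyRange_inv _
    (fun L mc => MDesc bulbs init mc (pvDoneA (init.length : Int) L 0))
    (init.length : Int) 2 init ?_ (by omega) ?_
  · intro L mc hL2 hLN hM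
    dsimp only
    refine MDesc_congr bulbs init _ (pvDoneA (init.length : Int) L ((init.length : Int) - L)) _
      (fun s e hs he => by
        simp only [pvDoneA, decide_eq_decide]
        constructor <;> intro h <;> omega) ?_
    refine foldl_pyRange_inv _
      (fun S mc => MDesc bulbs init mc (pvDoneA (init.length : Int) L S))
      ((init.length : Int) - L) 0 mc ?_ (by omega) hM
    intro S mc' hS0 hSN hM'
    dsimp only
    rw [lemA_inner bulbs init (init.length : Int) L S rfl hrows hL2 hLN hS0 hSN mc' hM']
    exact lemA_set_done bulbs init (init.length : Int) L S rfl hrows hL2 hLN hS0 hSN mc' hM'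
  · exact ⟨rfl, fun i => rfl, fun s e hs he => by
      rw [if_neg (by simp only [pvDoneA, decide_eq_true_eq]; omega)]⟩


-- ===== B-side characterization =====
def InvB (bulbs : List Int) (init : List (List Int))
    (memo : PySem.Dict (Int × Int) Int) (mc : List (List Int)) : Prop :=
  (∀ s e v, memo.get? (s, e) = some v →
      0 ≤ s ∧ 2 ≤ e - s ∧ e < (init.length : Int) ∧ v = pvV bulbs init s e) ∧
  (∀ s e, (memo.get? (s, e)).isSome = true →
      ∀ s' e', s ≤ s' → e' ≤ e → 2 ≤ e' - s' → (memo.get? (s', e')).isSome = true) ∧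
  MDesc bulbs init mc (fun s e => (memo.get? (s, e)).isSome)

theorem isSome_insert (d : PySem.Dict (Int × Int) Int) (k : Int × Int) (v : Int) (q : Int × Int)
    (h : (d.get? q).isSome = true) : ((d.insert k v).get? q).isSome = true := by
  rw [PySem.Dict.get?_insert]
  split
  · rfl
  · exact h

theorem isSome_mono (A B : PySem.Dict (Int × Int) Int) (q : Int × Int)
    (hmono : ∀ q v, A.get? q = some v → B.get? q = some v)
    (h : (A.get? q).isSome = true) : (B.get? q).isSome = true := by
  obtain ⟨v, hv⟩ := Option.isSome_iff_exists.mp h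
  rw [hmono q v hv]
  rfl

theorem lemB_loop (bulbs : List Int) (init : List (List Int))
    (hrows : ∀ row ∈ init, init.length ≤ row.length) (f : Nat) (s e : Int)
    (hs : 0 ≤ s) (hspan : 2 ≤ e - s) (heN : e < (init.length : Int)) (hf : (e - s).toNat ≤ f)
    (ih : ∀ (s' e' : Int) (memo' : PySem.Dict (Int × Int) Int) (mc' : List (List Int)),
      0 ≤ s' → s' ≤ e' → e' < (init.length : Int) → (e' - s').toNat < f →
      InvB bulbs init memo' mc' →
      (pvSolve bulbs f s' e' (memo', mc')).1 = pvV bulbs init s' e' ∧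
      InvB bulbs init (pvSolve bulbs f s' e' (memo', mc')).2.1 (pvSolve bulbs f s' e' (memo', mc')).2.2 ∧
      (∀ q v, memo'.get? q = some v → (pvSolve bulbs f s' e' (memo', mc')).2.1.get? q = some v) ∧
      (∀ s'' e'', s' ≤ s'' → e'' ≤ e' → 2 ≤ e'' - s'' →
        ((pvSolve bulbs f s' e' (memo', mc')).2.1.get? (s'', e'')).isSome = true))
    (memo : PySem.Dict (Int × Int) Int) (mc : List (List Int))
    (hInv : InvB bulbs init memo mc) (hmemo : memo.get? (s, e) = none) :
    ∀ R, R = (PySem.List.pyRange (s + 1) (e + 1) 1).foldl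
          (fun (p : Int × PySem.Dict (Int × Int) Int × List (List Int)) m =>
            let r1 := pvSolve bulbs f s (m - 1) p.2
            let r2 := pvSolve bulbs f m e r1.2
            let cost0 := r1.1 + r2.1
            let cost := if pvGetI bulbs s ≠ pvGetI bulbs m then cost0 + 1 else cost0
            (if cost < p.1 then cost else p.1, r2.2))
          (pvGet2 mc s e, (memo, mc)) →
      R.1 = (PySem.List.pyRange (s + 1) (e + 1) 1).foldl
          (fun acc m => min acc (pvV bulbs init s (m - 1) + pvV bulbs init m e + pvDelta bulbs s m))
          (pvGet2 init s e) ∧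
      InvB bulbs init R.2.1 R.2.2 ∧
      (∀ q v, memo.get? q = some v → R.2.1.get? q = some v) ∧
      (∀ m, s + 1 ≤ m → m < e + 1 →
        (∀ s' e', s ≤ s' → e' ≤ m - 1 → 2 ≤ e' - s' → (R.2.1.get? (s', e')).isSome = true) ∧
        (∀ s' e', m ≤ s' → e' ≤ e → 2 ≤ e' - s' → (R.2.1.get? (s', e')).isSome = true)) := by
  intro R hR
  subst hR
  refine foldl_pyRange_inv _
    (fun i p =>
      p.1 = (PySem.List.pyRange (s + 1) i 1).foldl
          (fun acc m => min acc (pvV bulbs init s (m - 1) + pvV bulbs init m e + pvDelta bulbs s m))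
          (pvGet2 init s e) ∧
      InvB bulbs init p.2.1 p.2.2 ∧
      (∀ q v, memo.get? q = some v → p.2.1.get? q = some v) ∧
      (∀ m, s + 1 ≤ m → m < i →
        (∀ s' e', s ≤ s' → e' ≤ m - 1 → 2 ≤ e' - s' → (p.2.1.get? (s', e')).isSome = true) ∧
        (∀ s' e', m ≤ s' → e' ≤ e → 2 ≤ e' - s' → (p.2.1.get? (s', e')).isSome = true)))
    (e + 1) (s + 1) (pvGet2 mc s e, (memo, mc)) ?_ (by omega) ?_
  case refine_2 =>
    refine ⟨?_, hInv, fun q v h => h, fun m hm1 hm2 => absurd (by omega : (m:Int) < m) (lt_irrefl _)⟩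
    · dsimp only
      rw [PySem.List.pyRange_one_eq_nil le_rfl, List.foldl_nil]
      have hval := hInv.2.2.2.2 s e hs (by omega)
      simp only [hmemo] at hval
      simpa using hval
  case refine_1 =>
    intro i p hi1 hi2 hP
    obtain ⟨pv, pst⟩ := p
    obtain ⟨pm, pc⟩ := pst
    obtain ⟨hval, hinv, hmono, hkeys⟩ := hP
    dsimp only at hval hinv hmono hkeys ⊢
    obtain ⟨h1v, h1inv, h1mono, h1keys⟩ :=
      ih s (i - 1) pm pc hs (by omega) (by omega) (by omega) hinv
    rcases hsplit1 : pvSolve bulbs f s (i - 1) (pm, pc) with ⟨r1v, r1m, r1c⟩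
    rw [hsplit1] at h1v h1inv h1mono h1keys
    dsimp only at h1v h1inv h1mono h1keys ⊢
    obtain ⟨h2v, h2inv, h2mono, h2keys⟩ :=
      ih i e r1m r1c (by omega) (by omega) heN (by omega) h1inv
    rcases hsplit2 : pvSolve bulbs f i e (r1m, r1c) with ⟨r2v, r2m, r2c⟩
    rw [hsplit2] at h2v h2inv h2mono h2keys
    dsimp only at h2v h2inv h2mono h2keys ⊢
    subst h1v h2v
    refine ⟨?_, h2inv, fun q v h => h2mono q v (h1mono q v (hmono q v h)), ?_⟩
    · rw [PySem.List.pyRange_one_succ_right (by omega : s + 1 ≤ i), List.foldl_append,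
        List.foldl_cons, List.foldl_nil, ← hval]
      by_cases hb : pvGetI bulbs s = pvGetI bulbs i
      · simp only [pvDelta, hb, if_pos, ne_eq, not_true_eq_false, if_false]
        rw [Int.min_def]
        split_ifs <;> omega
      · simp only [pvDelta, hb, ne_eq, not_false_eq_true, if_true, if_false]
        rw [Int.min_def]
        split_ifs <;> omega
    · intro m hm1 hm2
      by_cases hmi : m < i
      · have hold := hkeys m hm1 hmi
        exact ⟨fun s' e' a b c => isSome_mono _ _ _ h2mono (isSome_mono _ _ _ h1mono (hold.1 s' e' a b c)),
               fun s' e' a b c => isSome_mono _ _ _ h2mono (isSome_mono _ _ _ h1mono (hold.2 s' e' a b c))⟩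
      · have hm : m = i := by omega
        subst hm
        exact ⟨fun s' e' a b c => isSome_mono _ _ _ h2mono (h1keys s' e' a b c),
               fun s' e' a b c => h2keys s' e' a b c⟩

theorem solveB_correct (bulbs : List Int) (init : List (List Int))
    (hrows : ∀ row ∈ init, init.length ≤ row.length) :
    ∀ (fuel : Nat) (s e : Int) (memo : PySem.Dict (Int × Int) Int) (mc : List (List Int)),
      0 ≤ s → s ≤ e → e < (init.length : Int) → (e - s).toNat < fuel →
      InvB bulbs init memo mc →
      (pvSolve bulbs fuel s e (memo, mc)).1 = pvV bulbs init s e ∧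
      InvB bulbs init (pvSolve bulbs fuel s e (memo, mc)).2.1 (pvSolve bulbs fuel s e (memo, mc)).2.2 ∧
      (∀ q v, memo.get? q = some v → (pvSolve bulbs fuel s e (memo, mc)).2.1.get? q = some v) ∧
      (∀ s' e', s ≤ s' → e' ≤ e → 2 ≤ e' - s' →
        ((pvSolve bulbs fuel s e (memo, mc)).2.1.get? (s', e')).isSome = true) := by
  intro fuel
  induction fuel with
  | zero => intro s e memo mc _ _ _ h; omega
  | succ f ih =>
    intro s e memo mc hs hse heN hfuel hInv
    by_cases hbase : e - s < 2
    · have hred : pvSolve bulbs (f + 1) s e (memo, mc) = (pvGet2 mc s e, (memo, mc)) := by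
        simp only [pvSolve]
        rw [if_pos hbase]
      rw [hred]
      have hnone : (memo.get? (s, e)).isSome = false := by
        cases hg : memo.get? (s, e) with
        | none => rfl
        | some v => have := (hInv.1 s e v hg).2.1; omega
      have hval := hInv.2.2.2.2 s e hs (by omega)
      simp only [hnone, Bool.false_eq_true, if_false] at hval
      refine ⟨?_, hInv, fun q v h => h, fun s' e' a b c => absurd (by omega : (2:Int) ≤ e - s) (by omega)⟩
      rw [hval, pvV_base bulbs init s e hbase]
    · cases hmemo : memo.get? (s, e) with
      | some v =>
        have hred : pvSolve bulbs (f + 1) s e (memo, mc) = (v, (memo, mc)) := by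
          simp only [pvSolve]
          rw [if_neg hbase, hmemo]
        rw [hred]
        obtain ⟨_, _, _, hvv⟩ := hInv.1 s e v hmemo
        exact ⟨hvv, hInv, fun q v h => h,
          fun s' e' a b c => hInv.2.1 s e (by rw [hmemo]; rfl) s' e' a b c⟩
      | none =>
        have hloop := lemB_loop bulbs init hrows f s e hs (by omega) heN (by omega)
          ih memo mc hInv hmemo _ rfl
        obtain ⟨hv, hinvR, hmonoR, hkeysR⟩ := hloop
        have hred : pvSolve bulbs (f + 1) s e (memo, mc) =
            (let r := (PySem.List.pyRange (s + 1) (e + 1) 1).foldl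
              (fun (p : Int × PySem.Dict (Int × Int) Int × List (List Int)) m =>
                let r1 := pvSolve bulbs f s (m - 1) p.2
                let r2 := pvSolve bulbs f m e r1.2
                let cost0 := r1.1 + r2.1
                let cost := if pvGetI bulbs s ≠ pvGetI bulbs m then cost0 + 1 else cost0
                (if cost < p.1 then cost else p.1, r2.2))
              (pvGet2 mc s e, (memo, mc));
             (r.1, r.2.1.insert (s, e) r.1, pvSet2 r.2.2 s e r.1)) := by
          simp only [pvSolve]
          rw [if_neg hbase, hmemo]
        rw [hred]
        dsimp only
        set R := (PySem.List.pyRange (s + 1) (e + 1) 1).foldl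
              (fun (p : Int × PySem.Dict (Int × Int) Int × List (List Int)) m =>
                let r1 := pvSolve bulbs f s (m - 1) p.2
                let r2 := pvSolve bulbs f m e r1.2
                let cost0 := r1.1 + r2.1
                let cost := if pvGetI bulbs s ≠ pvGetI bulbs m then cost0 + 1 else cost0
                (if cost < p.1 then cost else p.1, r2.2))
              (pvGet2 mc s e, (memo, mc)) with hRdef
        have hvV : R.1 = pvV bulbs init s e := by
          rw [hv, ← pvV_step bulbs init s e hbase]
        have hcover : ∀ s' e', s ≤ s' → e' ≤ e → 2 ≤ e' - s' →
            ((R.2.1.insert (s, e) R.1).get? (s', e')).isSome = true := by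
          intro s' e' h1 h2 h3
          by_cases hq : (s', e') = (s, e)
          · rw [hq, PySem.Dict.get?_insert_self]
            rfl
          · apply isSome_insert
            by_cases hs' : s + 1 ≤ s'
            · exact (hkeysR (s + 1) le_rfl (by omega)).2 s' e' hs' h2 h3
            · have hseq : s' = s := by omega
              subst hseq
              have he' : e' ≤ e - 1 := by
                rcases eq_or_lt_of_le h2 with h | h
                · exact absurd (by rw [h]) hq
                · omega
              exact (hkeysR e (by omega) (by omega)).1 s' e' le_rfl he' h3
        refine ⟨hvV, ⟨?_, ?_, ?_⟩, ?_, hcover⟩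
        · -- InvB conj1
          intro s' e' v hv'
          rw [PySem.Dict.get?_insert] at hv'
          by_cases hq : ((s', e') : Int × Int) = (s, e)
          · rw [if_pos hq] at hv'
            obtain ⟨hq1, hq2⟩ := Prod.mk.injEq .. ▸ hq
            injection hv' with hv''
            subst hq1; subst hq2
            exact ⟨hs, by omega, heN, by rw [← hv'', hvV]⟩
          · rw [if_neg hq] at hv'
            exact hinvR.1 s' e' v hv'
        · -- InvB conj2 (closure)
          intro s' e' hsome s'' e'' a b c
          rw [PySem.Dict.get?_insert] at hsome
          by_cases hq : ((s', e') : Int × Int) = (s, e)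
          · obtain ⟨hq1, hq2⟩ := Prod.mk.injEq .. ▸ hq
            subst hq1; subst hq2
            exact hcover s'' e'' a b c
          · rw [if_neg hq] at hsome
            exact isSome_insert _ _ _ _ (hinvR.2.1 s' e' hsome s'' e'' a b c)
        · -- InvB conj3 (MDesc)
          have hMR := hinvR.2.2
          have hlenR : R.2.2.length = init.length := hMR.1
          have hSlt : s < (R.2.2.length : Int) := by omega
          have hElt : e < ((pvRow R.2.2 s).length : Int) := by
            have := rowlen_ge init R.2.2 hlenR hMR.2.1 hrows s hs (by omega)
            omega
          refine ⟨by rw [len_pvSet2, hlenR],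
            fun i => by rw [rowlen_pvSet2 _ _ _ _ hs (by omega), hMR.2.1], fun s' e' hs' he' => ?_⟩
          beta_reduce
          rw [pvGet2_pvSet2 R.2.2 s e R.1 s' e' hs (by omega) hs' he' hSlt hElt]
          by_cases hcell : s' = s ∧ e' = e
          · obtain ⟨rfl, rfl⟩ := hcell
            rw [if_pos ⟨rfl, rfl⟩, if_pos (by rw [PySem.Dict.get?_insert_self]; rfl), hvV]
          · rw [if_neg hcell, hMR.2.2 s' e' hs' he']
            have hne : ((s', e') : Int × Int) ≠ (s, e) := by
              simpa [Prod.ext_iff] using hcell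
            rw [PySem.Dict.get?_insert, if_neg hne]
        · -- mono
          intro q v hq
          have hne : q ≠ (s, e) := by
            intro h
            rw [h, hmemo] at hq
            cases hq
          rw [PySem.Dict.get?_insert, if_neg hne]
          exact hmonoR q v hq

theorem lemB_main (bulbs : List Int) (init : List (List Int))
    (h3 : 3 ≤ init.length) (hrows : ∀ row ∈ init, init.length ≤ row.length) :
    MDesc bulbs init (calculateMinCosts_alt bulbs init) (pvDoneF (init.length : Int)) := by
  unfold calculateMinCosts_alt
  rw [if_pos h3]
  have hInv0 : InvB bulbs init PySem.Dict.empty init := by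
    refine ⟨?_, ?_, rfl, fun i => rfl, ?_⟩
    · intro s e v h
      rw [PySem.Dict.get?_empty] at h
      simp at h
    · intro s e h
      rw [PySem.Dict.get?_empty] at h
      simp at h
    · intro s e hs he
      simp [PySem.Dict.get?_empty]
  obtain ⟨hv, hinvF, hmonoF, hkeysF⟩ :=
    solveB_correct bulbs init hrows init.length 0 ((init.length : Int) - 1)
      PySem.Dict.empty init (le_refl 0) (by omega) (by omega) (by omega) hInv0
  refine MDesc_congr bulbs init _ _ _ ?_ hinvF.2.2
  intro s e hs he
  beta_reduce
  by_cases hd : 2 ≤ e - s ∧ e < (init.length : Int)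
  · rw [hkeysF s e hs (by omega) (by omega)]
    symm
    simp only [pvDoneF, decide_eq_true_eq]
    omega
  · cases hg : (pvSolve bulbs init.length 0 ((init.length : Int) - 1)
        (PySem.Dict.empty, init)).2.1.get? (s, e) with
    | none =>
      symm
      simp only [pvDoneF, Option.isSome_none, decide_eq_false_iff_not]
      omega
    | some v =>
      obtain ⟨_, hsp, hlt, _⟩ := hinvF.1 s e v hg
      exact absurd ⟨hsp, hlt⟩ hd

-- ===== VERDICT (by name: the statement is the Claim_ definition above) =====
theorem calculateMinCosts_spec : Claim_equal_calculateMinCosts := by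
  unfold Claim_equal_calculateMinCosts
  intro bulbs min_costs hdom hpre
  unfold Spec_calculateMinCosts
  by_cases h3 : 3 ≤ min_costs.length
  · obtain ⟨hb, hrows⟩ := hpre h3
    exact MDesc_eq bulbs min_costs _ _ _ (lemA_main bulbs min_costs h3 hrows)
      (lemB_main bulbs min_costs h3 hrows)
  · unfold calculateMinCosts calculateMinCosts_alt
    rw [if_neg h3, PySem.List.pyRange_one_eq_nil (by omega : (min_costs.length : Int) ≤ 2),
      List.foldl_nil]
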